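-- pv_equiv track=rewrite | github.com/st3fan/ampify | scramper-results-to-rules.py | path_to_regex2
-- ===== SOURCE A (Python) =====
-- def path_to_regex2(path):
--     regex = ""
--     parts = path.split("/")[1:]
--     for part in parts:
--         if part == "":
--             regex += '/'
--         elif part.isdigit():
--             regex += '/([0-9]+)'
--         else:
--             regex += '/([^/]+)'
--     return regex
-- ===== SOURCE B (Python) =====
-- def path_to_regex2(path):
--     # single character-level pass: classify each segment on the fly with two
--     # boolean flags instead of splitting the path into a list of segments
--     regex = ''
--     started = False   # have we passed the first '/' yet?
--     empty = True      # current segment has no characters so far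
--     digits = True     # current segment is all digits so far
--     for ch in path:
--         if ch == '/':
--             if started:
--                 regex += '/' if empty else '/([0-9]+)' if digits else '/([^/]+)'
--             started, empty, digits = True, True, True
--         elif started:
--             empty = False
--             digits = digits and ch.isdigit()
--     if started:
--         regex += '/' if empty else '/([0-9]+)' if digits else '/([^/]+)'
--     return regex
-- ===== Notes on version B (the rewrite author's own statement) =====
-- stated objective: alternative
-- what changed: B replaces split-into-segments-then-loop by one character-level pass over the path that classifies each segment on the fly with two boolean flags (empty-so-far, all-digits-so-far), emitting the piece at each slash and at the end; no segment list or segment strings are built.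
import Mathlib
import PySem

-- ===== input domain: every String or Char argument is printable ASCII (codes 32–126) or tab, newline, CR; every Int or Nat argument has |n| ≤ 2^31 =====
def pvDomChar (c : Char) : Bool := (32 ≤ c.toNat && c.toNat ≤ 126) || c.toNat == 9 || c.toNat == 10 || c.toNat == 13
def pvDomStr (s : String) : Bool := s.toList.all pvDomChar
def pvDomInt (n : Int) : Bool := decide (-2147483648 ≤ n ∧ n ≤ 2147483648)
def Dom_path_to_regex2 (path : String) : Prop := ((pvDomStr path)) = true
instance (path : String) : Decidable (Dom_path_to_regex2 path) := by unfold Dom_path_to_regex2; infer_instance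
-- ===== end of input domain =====

-- B replaces A's split-into-a-segment-list-then-loop by a single character-level pass that
-- classifies each segment on the fly with two boolean flags; same return value, no speed claim.

-- ===== PORT A =====
def path_to_regex2 (path : String) : String :=
  -- parts = path.split("/")[1:]  (sep "/" is nonempty, so split? is always `some`)
  let parts := PySem.List.slice ((PySem.Str.split? path "/").getD []) (some 1) none
  parts.foldl (fun regex part =>
    if part == "" then regex ++ "/"
    else if PySem.Str.strIsdigit part then regex ++ "/([0-9]+)"
    else regex ++ "/([^/]+)") ""

-- ===== PORT B =====
-- Source B's "'/' if empty else '/([0-9]+)' if digits else '/([^/]+)'"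
def pvEmit (empty digits : Bool) : String :=
  if empty then "/" else if digits then "/([0-9]+)" else "/([^/]+)"

-- Source B's for-loop over the characters, state = (started, empty, digits, regex);
-- the trailing `if started: regex += …` is the [] case.
def pvScan : List Char → Bool → Bool → Bool → String → String
  | [], started, empty, digits, regex =>
      if started then regex ++ pvEmit empty digits else regex
  | c :: cs, started, empty, digits, regex =>
      if c = '/' then
        pvScan cs true true true (if started then regex ++ pvEmit empty digits else regex)
      else if started then
        pvScan cs started false (digits && PySem.Chars.isdigit c) regex
      else
        pvScan cs started empty digits regex

def path_to_regex2_alt (path : String) : String :=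
  pvScan path.toList false true true ""

-- ===== PRECONDITION & SPEC =====
def Spec_path_to_regex2 (path : String) (out : String) : Prop := out = path_to_regex2_alt path
instance (path : String) (out : String) : Decidable (Spec_path_to_regex2 path out) := by unfold Spec_path_to_regex2; infer_instance

-- ===== CLAIM (what is proved, stated in full; the proofs are below) =====
def Claim_equal_path_to_regex2 : Prop := ∀ (path : String), Dom_path_to_regex2 path → Spec_path_to_regex2 path (path_to_regex2 path)

-- ===== LEMMAS AND PROOFS =====

-- proof-only clean model of splitting on '/'
def pvSplit1 : List Char → List (List Char)
  | [] => [[]]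
  | c :: rest => if c = '/' then [] :: pvSplit1 rest
                 else (pvSplit1 rest).modifyHead (c :: ·)

theorem pvSplit1_ne_nil (l : List Char) : pvSplit1 l ≠ [] := by
  induction l with
  | nil => simp [pvSplit1]
  | cons c rest ih =>
    simp only [pvSplit1]
    split
    · simp
    · cases hh : pvSplit1 rest with
      | nil => exact absurd hh ih
      | cons x xs => simp [List.modifyHead]

theorem pvGo_eq (fuel : Nat) : ∀ (l cur acc : _), l.length < fuel →
    PySem.Chars.splitOn.go ['/'] fuel l cur acc
      = acc.reverse ++ (pvSplit1 l).modifyHead (cur.reverse ++ ·) := by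
  induction fuel with
  | zero => intro l cur acc h; omega
  | succ n ih =>
    intro l cur acc h
    cases l with
    | nil => simp [PySem.Chars.splitOn.go, pvSplit1]
    | cons c rest =>
      rw [PySem.Chars.splitOn.go]
      by_cases hc : c = '/'
      · subst hc
        have hpre : ['/'].isPrefixOf ('/' :: rest) = true := by simp [List.isPrefixOf]
        rw [if_pos hpre]
        rw [show List.drop ['/'].length ('/' :: rest) = rest from rfl]
        rw [ih rest [] (cur.reverse :: acc) (by simp at h ⊢; omega)]
        obtain ⟨x, xs, hx⟩ : ∃ x xs, pvSplit1 rest = x :: xs := by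
          cases hh : pvSplit1 rest with
          | nil => exact absurd hh (pvSplit1_ne_nil rest)
          | cons x xs => exact ⟨x, xs, rfl⟩
        simp [pvSplit1, hx, List.modifyHead]
      · have hpre : ['/'].isPrefixOf (c :: rest) = false := by
          simp [List.isPrefixOf]; exact fun hh => absurd hh.symm hc
        rw [if_neg (by simp [hpre])]
        rw [ih rest (c :: cur) acc (by simp at h ⊢; omega)]
        obtain ⟨x, xs, hx⟩ : ∃ x xs, pvSplit1 rest = x :: xs := by
          cases hh : pvSplit1 rest with
          | nil => exact absurd hh (pvSplit1_ne_nil rest)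
          | cons x xs => exact ⟨x, xs, rfl⟩
        simp [pvSplit1, hc, hx, List.modifyHead]

theorem pvSplitOn_eq (cs : List Char) : PySem.Chars.splitOn cs ['/'] = pvSplit1 cs := by
  rw [PySem.Chars.splitOn, pvGo_eq (cs.length + 1) cs [] [] (by omega)]
  obtain ⟨x, xs, hx⟩ : ∃ x xs, pvSplit1 cs = x :: xs := by
    cases hh : pvSplit1 cs with
    | nil => exact absurd hh (pvSplit1_ne_nil cs)
    | cons x xs => exact ⟨x, xs, rfl⟩
  simp [hx, List.modifyHead]

-- characterisation of pvSplit1 by the first '/'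
theorem pvSplit1_no_slash (cs : List Char)
    (h : cs.dropWhile (fun c => decide (c ≠ '/')) = []) : pvSplit1 cs = [cs] := by
  induction cs with
  | nil => simp [pvSplit1]
  | cons c rest ih =>
    by_cases hc : c = '/'
    · subst hc; simp [List.dropWhile] at h
    · rw [List.dropWhile_cons_of_pos (by simp [hc])] at h
      simp [pvSplit1, hc, ih h, List.modifyHead]

theorem pvSplit1_slash (cs d : _) (rs : List Char)
    (h : cs.dropWhile (fun c => decide (c ≠ '/')) = d :: rs) :
    pvSplit1 cs = cs.takeWhile (fun c => decide (c ≠ '/')) :: pvSplit1 rs := by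
  induction cs with
  | nil => simp at h
  | cons c rest ih =>
    by_cases hc : c = '/'
    · subst hc
      rw [List.dropWhile_cons_of_neg (by simp)] at h
      obtain ⟨rfl, rfl⟩ := by exact And.intro (List.cons.inj h).1 (List.cons.inj h).2
      simp [pvSplit1, List.takeWhile]
    · rw [List.dropWhile_cons_of_pos (by simp [hc])] at h
      rw [List.takeWhile_cons_of_pos (by simp [hc])]
      simp [pvSplit1, hc, ih h, List.modifyHead]

-- A's loop body applied to a segment equals appending B's emitted piece for that segment
theorem pvStep_eq (seg : List Char) (r : String) :
    (if String.ofList seg == "" then r ++ "/"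
     else if PySem.Str.strIsdigit (String.ofList seg) then r ++ "/([0-9]+)"
     else r ++ "/([^/]+)") = r ++ pvEmit seg.isEmpty (seg.all PySem.Chars.isdigit) := by
  have h1 : (String.ofList seg == "") = seg.isEmpty := by
    cases seg with
    | nil => simp
    | cons c cs => simp [String.ofList_eq_empty_iff]
  have h2 : PySem.Str.strIsdigit (String.ofList seg)
      = (!seg.isEmpty && seg.all PySem.Chars.isdigit) := by
    simp [PySem.Str.strIsdigit, PySem.Chars.strIsdigit]
  rw [h1, h2]
  cases he : seg.isEmpty with
  | false =>
    rw [pvEmit]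
    simp only [Bool.not_false, Bool.true_and, Bool.false_eq_true, if_false]
    split <;> rfl
  | true => simp [pvEmit]

-- in the started = true phase, the scan computes A's fold over the remaining segments,
-- with the incoming flags folded into the current (first) segment's classification
theorem pvScanT_eq (cs : List Char) : ∀ (e d : Bool) (r : String),
    pvScan cs true e d r =
      (let seg := cs.takeWhile (fun c => decide (c ≠ '/'))
       let r' := r ++ pvEmit (e && seg.isEmpty) (d && seg.all PySem.Chars.isdigit)
       match cs.dropWhile (fun c => decide (c ≠ '/')) with
       | [] => r'
       | _ :: rs => ((pvSplit1 rs).map String.ofList).foldl (fun regex part =>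
           if part == "" then regex ++ "/"
           else if PySem.Str.strIsdigit part then regex ++ "/([0-9]+)"
           else regex ++ "/([^/]+)") r') := by
  induction cs with
  | nil => intro e d r; simp [pvScan]
  | cons c cs ih =>
    intro e d r
    by_cases hc : c = '/'
    · subst hc
      rw [List.takeWhile_cons_of_neg (by simp), List.dropWhile_cons_of_neg (by simp)]
      simp only [pvScan, reduceIte]
      rw [ih true true (r ++ pvEmit e d)]
      simp only [List.isEmpty_nil, Bool.and_true, List.all_nil]
      cases h : cs.dropWhile (fun c => decide (c ≠ '/')) with
      | nil =>
        have hseg : cs.takeWhile (fun c => decide (c ≠ '/')) = cs := by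
          conv_rhs => rw [← List.takeWhile_append_dropWhile
            (p := fun c => decide (c ≠ '/')) (l := cs)]
          rw [h, List.append_nil]
        rw [pvSplit1_no_slash cs h]
        simp only [List.map_cons, List.map_nil, List.foldl_cons, List.foldl_nil, pvStep_eq,
          Bool.true_and]
        rw [hseg]
      | cons x rs =>
        rw [pvSplit1_slash cs x rs h]
        simp only [List.map_cons, List.foldl_cons, pvStep_eq, Bool.true_and]
    · rw [List.takeWhile_cons_of_pos (by simp [hc]), List.dropWhile_cons_of_pos (by simp [hc])]
      simp only [pvScan, if_neg hc, reduceIte]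
      rw [ih false (d && PySem.Chars.isdigit c) r]
      simp only [List.isEmpty_cons, Bool.and_false, Bool.false_and, List.all_cons,
        Bool.and_assoc]

-- Source B's pre-first-slash phase changes no state
theorem pvScan_not_started (cs : List Char)
    (h : ∀ x ∈ cs, x ≠ '/') (e d : Bool) (r : String) :
    pvScan cs false e d r = r := by
  induction cs with
  | nil => simp [pvScan]
  | cons c cs ih =>
    have hc : c ≠ '/' := h c (by simp)
    simp only [pvScan, if_neg hc]
    exact ih (fun x hx => h x (by simp [hx]))

-- skipping a slash-free prefix up to the first '/' starts the scan fresh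
theorem pvScan_skip (pre : List Char) (h : ∀ x ∈ pre, x ≠ '/') :
    ∀ (rs : List Char) (e d : Bool) (r : String),
    pvScan (pre ++ '/' :: rs) false e d r = pvScan rs true true true r := by
  induction pre with
  | nil => intro rs e d r; simp [pvScan]
  | cons c cs ih =>
    intro rs e d r
    have hc : c ≠ '/' := h c (by simp)
    simp only [List.cons_append, pvScan, if_neg hc]
    exact ih (fun x hx => h x (by simp [hx])) rs e d r

-- with fresh flags the started scan is exactly A's fold over the segments
theorem pvScan_started (cs : List Char) (r : String) :
    pvScan cs true true true r =
      ((pvSplit1 cs).map String.ofList).foldl (fun regex part =>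
        if part == "" then regex ++ "/"
        else if PySem.Str.strIsdigit part then regex ++ "/([0-9]+)"
        else regex ++ "/([^/]+)") r := by
  rw [pvScanT_eq]
  cases h : cs.dropWhile (fun c => decide (c ≠ '/')) with
  | nil =>
    have hseg : cs.takeWhile (fun c => decide (c ≠ '/')) = cs := by
      conv_rhs => rw [← List.takeWhile_append_dropWhile
        (p := fun c => decide (c ≠ '/')) (l := cs)]
      rw [h, List.append_nil]
    rw [pvSplit1_no_slash cs h]
    simp only [List.map_cons, List.map_nil, List.foldl_cons, List.foldl_nil, pvStep_eq,
      Bool.true_and, hseg]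
  | cons x rs =>
    rw [pvSplit1_slash cs x rs h]
    simp only [List.map_cons, List.foldl_cons, pvStep_eq, Bool.true_and]

-- ===== VERDICT (by name: the statement is the Claim_ definition above) =====
theorem path_to_regex2_spec : Claim_equal_path_to_regex2 := by
  intro path _
  unfold Spec_path_to_regex2 path_to_regex2 path_to_regex2_alt
  have hsplit : PySem.Str.split? path "/" = some ((pvSplit1 path.toList).map String.ofList) := by
    rw [PySem.Str.split?]
    have : String.toList "/" = ['/'] := rfl
    rw [this, PySem.Chars.split?]
    simp [pvSplitOn_eq]
  rw [hsplit]
  simp only [Option.getD_some]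
  rw [PySem.List.slice_from _ (by norm_num)]
  cases h : path.toList.dropWhile (fun c => decide (c ≠ '/')) with
  | nil =>
    -- no '/': A folds over []; B's scan never starts
    rw [pvSplit1_no_slash path.toList h]
    rw [pvScan_not_started path.toList
      (fun x hx => by
        by_contra hxeq
        have := List.dropWhile_eq_nil_iff.mp h x hx
        simp [hxeq] at this)]
    simp
  | cons x rs =>
    -- path = pre ++ '/' :: rs with pre slash-free: skip pre, then scan = fold over segments
    have hx : x = '/' := by
      have := List.head?_dropWhile_not (fun c => decide (c ≠ '/')) path.toList
      rw [h] at this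
      simpa using this
    subst hx
    have hdecomp : path.toList
        = path.toList.takeWhile (fun c => decide (c ≠ '/')) ++ '/' :: rs := by
      conv_lhs => rw [← List.takeWhile_append_dropWhile
        (p := fun c => decide (c ≠ '/')) (l := path.toList)]
      rw [h]
    rw [pvSplit1_slash path.toList '/' rs h]
    conv_rhs => rw [hdecomp]
    rw [pvScan_skip _ (fun x hx => by
        have := List.mem_takeWhile_imp hx
        simpa using this)]
    rw [pvScan_started]
    simp only [List.map_cons]
    rw [show ((1:Int).toNat) = 1 from rfl]
    simp only [List.drop_succ_cons, List.drop_zero]
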